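-- pv_equiv track=rewrite | github.com/murnet/algorithms-templates | python/practice/sprint13/tasks/G.py | wardrobe
-- ===== SOURCE A (Python) =====
-- def wardrobe(array):
--     pink, yellow, crimson = [], [], []
--     for color in array:
--         if color == '0':
--             pink.append(color)
--         elif color == '1':
--             yellow.append(color)
--         else:
--             crimson.append(color)
--
--     return pink + yellow + crimson
-- ===== SOURCE B (Python) =====
-- def wardrobe(array):
--     return sorted(array, key=lambda color: 0 if color == '0' else (1 if color == '1' else 2))
-- ===== Notes on version B (the rewrite author's own statement) =====
-- stated objective: idiomatic
-- what changed: Replaced the three-bucket partition loop with a single stable sorted() call keyed by '0'->0, '1'->1, other->2.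
import Mathlib
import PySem

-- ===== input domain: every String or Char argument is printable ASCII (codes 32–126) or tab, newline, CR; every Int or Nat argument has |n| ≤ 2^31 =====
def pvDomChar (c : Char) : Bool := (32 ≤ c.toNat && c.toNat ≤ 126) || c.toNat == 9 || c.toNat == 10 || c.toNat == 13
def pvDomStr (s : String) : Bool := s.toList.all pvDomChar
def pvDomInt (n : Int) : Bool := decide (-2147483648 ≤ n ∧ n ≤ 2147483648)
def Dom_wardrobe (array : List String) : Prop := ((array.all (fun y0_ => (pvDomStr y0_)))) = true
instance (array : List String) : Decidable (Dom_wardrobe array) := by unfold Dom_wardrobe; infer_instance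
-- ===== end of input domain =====

-- B replaces A's three-bucket partition loop with one stable sort keyed '0'→0, '1'→1, other→2 (idiomatic; same return value).

-- ===== PORT A =====
-- three accumulators pink/yellow/crimson, appended in order, then concatenated
def wardrobe (array : List String) : List String :=
  let st := array.foldl
    (fun (st : List String × List String × List String) color =>
      if color = "0" then (st.1 ++ [color], st.2.1, st.2.2)
      else if color = "1" then (st.1, st.2.1 ++ [color], st.2.2)
      else (st.1, st.2.1, st.2.2 ++ [color]))
    ([], [], [])
  st.1 ++ st.2.1 ++ st.2.2

-- ===== PORT B =====
-- key function of Source B's lambda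
def wardrobeKey (color : String) : Int :=
  if color = "0" then 0 else if color = "1" then 1 else 2

def wardrobe_alt (array : List String) : List String :=
  PySem.List.sorted array wardrobeKey

-- ===== PRECONDITION & SPEC =====
def Spec_wardrobe (array : List String) (out : List String) : Prop := out = wardrobe_alt array
instance (array : List String) (out : List String) : Decidable (Spec_wardrobe array out) := by unfold Spec_wardrobe; infer_instance

-- ===== CLAIM (what is proved, stated in full; the proofs are below) =====
def Claim_equal_wardrobe : Prop := ∀ (array : List String), Dom_wardrobe array → Spec_wardrobe array (wardrobe array)

-- ===== LEMMAS AND PROOFS =====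

def pvF0 (xs : List String) : List String := xs.filter (fun s => s = "0")
def pvF1 (xs : List String) : List String := xs.filter (fun s => s = "1")
def pvF2 (xs : List String) : List String := xs.filter (fun s => ¬ s = "0" ∧ ¬ s = "1")

-- A's loop invariant: the three buckets are the three filters, prefixed by the accumulators
theorem wardrobe_loop_eq (xs : List String) :
    ∀ (p y c : List String),
      xs.foldl
        (fun (st : List String × List String × List String) color =>
          if color = "0" then (st.1 ++ [color], st.2.1, st.2.2)
          else if color = "1" then (st.1, st.2.1 ++ [color], st.2.2)
          else (st.1, st.2.1, st.2.2 ++ [color]))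
        (p, y, c)
      = (p ++ pvF0 xs, y ++ pvF1 xs, c ++ pvF2 xs) := by
  induction xs with
  | nil => intro p y c; simp [pvF0, pvF1, pvF2]
  | cons x t ih =>
    intro p y c
    by_cases h0 : x = "0"
    · simp [List.foldl_cons, h0, ih, pvF0, pvF1, pvF2]
    · by_cases h1 : x = "1"
      · simp [List.foldl_cons, h1, ih, pvF0, pvF1, pvF2]
      · simp [List.foldl_cons, h0, h1, ih, pvF0, pvF1, pvF2]

theorem wardrobe_eq_filters (xs : List String) :
    wardrobe xs = pvF0 xs ++ pvF1 xs ++ pvF2 xs := by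
  simp [wardrobe, wardrobe_loop_eq]

-- insertBy inserts in front when the first test already succeeds on every element
theorem insertBy_all_true {α : Type} (bef : α → α → Bool) (x : α) (l : List α)
    (h : ∀ y ∈ l, bef x y = true) :
    PySem.List.insertBy bef x l = x :: l := by
  cases l with
  | nil => rfl
  | cons y t => simp [PySem.List.insertBy, h y (by simp)]

-- insertBy skips a prefix on which the test fails
theorem insertBy_append_false {α : Type} (bef : α → α → Bool) (x : α) (l t : List α)
    (h : ∀ y ∈ l, bef x y = false) :
    PySem.List.insertBy bef x (l ++ t) = l ++ PySem.List.insertBy bef x t := by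
  induction l with
  | nil => rfl
  | cons y l ih =>
    have hy : bef x y = false := h y (by simp)
    simp [PySem.List.insertBy, hy]
    exact ih (fun z hz => h z (by simp [hz]))

theorem key_of_F0 {s : String} (h : s ∈ pvF0 xs) : wardrobeKey s = 0 := by
  have := List.of_mem_filter h
  simp at this
  simp [wardrobeKey, this]

theorem key_of_F1 {s : String} (h : s ∈ pvF1 xs) : wardrobeKey s = 1 := by
  have := List.of_mem_filter h
  simp at this
  simp [wardrobeKey, this]

theorem key_of_F2 {s : String} (h : s ∈ pvF2 xs) : wardrobeKey s = 2 := by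
  have := List.of_mem_filter h
  simp at this
  simp [wardrobeKey, this.1, this.2]

-- the stable sort by wardrobeKey is exactly the three filters concatenated
theorem sorted_eq_filters (xs : List String) :
    PySem.List.sorted xs wardrobeKey = pvF0 xs ++ pvF1 xs ++ pvF2 xs := by
  induction xs using List.reverseRecOn with
  | nil => rfl
  | append_singleton t x ih =>
    rw [PySem.List.sorted_eq_foldl_insertBy] at ih ⊢
    rw [List.foldl_append, List.foldl_cons, List.foldl_nil, ih]
    set bef : String → String → Bool := fun a b => decide (wardrobeKey a < wardrobeKey b) with hbef
    by_cases h0 : x = "0"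
    · have hx : wardrobeKey x = 0 := by simp [wardrobeKey, h0]
      rw [List.append_assoc, insertBy_append_false bef x _ _
        (fun y hy => by simp [hbef, hx, key_of_F0 hy]),
        insertBy_all_true bef x _ (fun y hy => by
          rcases List.mem_append.1 hy with h | h
          · simp [hbef, hx, key_of_F1 h]
          · simp [hbef, hx, key_of_F2 h])]
      simp [pvF0, pvF1, pvF2, List.filter_append, h0]
    · by_cases h1 : x = "1"
      · have hx : wardrobeKey x = 1 := by simp [wardrobeKey, h1]
        rw [insertBy_append_false bef x _ _
          (fun y hy => by
            rcases List.mem_append.1 hy with h | h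
            · simp [hbef, hx, key_of_F0 h]
            · simp [hbef, hx, key_of_F1 h]),
          insertBy_all_true bef x _ (fun y hy => by simp [hbef, hx, key_of_F2 hy])]
        simp [pvF0, pvF1, pvF2, List.filter_append, h1]
      · have hx : wardrobeKey x = 2 := by simp [wardrobeKey, h0, h1]
        rw [PySem.List.insertBy_of_forall_not_before bef x _
          (fun y hy => by
            rcases List.mem_append.1 hy with h | h
            · rcases List.mem_append.1 h with h' | h'
              · simp [hbef, hx, key_of_F0 h']
              · simp [hbef, hx, key_of_F1 h']
            · simp [hbef, hx, key_of_F2 h])]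
        simp [pvF0, pvF1, pvF2, List.filter_append, h0, h1]

-- ===== VERDICT (by name: the statement is the Claim_ definition above) =====
theorem wardrobe_spec : Claim_equal_wardrobe := by
  intro array _
  unfold Spec_wardrobe wardrobe_alt
  rw [wardrobe_eq_filters, sorted_eq_filters]
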